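-- pv_equiv track=rewrite | github.com/essential2189/codetree-TILs | 240426/겹치지 않게 선분 고르기/select-segments-without-overlap.py | check
-- ===== SOURCE A (Python) =====
-- def check(arr):
--     for i in range(len(arr)-1):
--         for j in range(i+1, len(arr)):
--             if arr[i][0] >= arr[j][0] and arr[i][0] <= arr[j][1]:
--                 return False
--             if arr[i][1] >= arr[j][0] and arr[i][1] <= arr[j][1]:
--                 return False
--
--     return True
-- ===== SOURCE B (Python) =====
-- def _bisect_left(pts, x):
--     lo, hi = 0, len(pts)
--     while lo < hi:
--         mid = (lo + hi) // 2
--         if pts[mid] < x: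
--             lo = mid + 1
--         else:
--             hi = mid
--     return lo
--
--
-- def _bisect_right(pts, x):
--     lo, hi = 0, len(pts)
--     while lo < hi:
--         mid = (lo + hi) // 2
--         if pts[mid] <= x:
--             lo = mid + 1
--         else:
--             hi = mid
--     return lo
--
--
-- def _insort(pts, x):
--     pts.insert(_bisect_left(pts, x), x)
--
--
-- def check(arr):
--     # sweep: keep every endpoint seen so far in a sorted list; a conflict with a
--     # later segment [l, r] exists iff some stored endpoint falls in [l, r],
--     # i.e. bisect_left(pts, l) < bisect_right(pts, r).
--     pts = []
--     for seg in arr: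
--         l, r = seg[0], seg[1]
--         if _bisect_left(pts, l) < _bisect_right(pts, r):
--             return False
--         _insort(pts, l)
--         _insort(pts, r)
--     return True
-- ===== Notes on version B (the rewrite author's own statement) =====
-- stated objective: alternative
-- what changed: A's nested pairwise scan is replaced by a single left-to-right sweep that keeps every endpoint seen so far in a sorted list and binary-searches (bisect_left/bisect_right) each later segment's range for a stored endpoint.
-- outside the precondition, e.g. on check([[]]): A returns True, B raises IndexError; on check([[1, 2], [1, 5], []]): A returns False, B returns False
import Mathlib
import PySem

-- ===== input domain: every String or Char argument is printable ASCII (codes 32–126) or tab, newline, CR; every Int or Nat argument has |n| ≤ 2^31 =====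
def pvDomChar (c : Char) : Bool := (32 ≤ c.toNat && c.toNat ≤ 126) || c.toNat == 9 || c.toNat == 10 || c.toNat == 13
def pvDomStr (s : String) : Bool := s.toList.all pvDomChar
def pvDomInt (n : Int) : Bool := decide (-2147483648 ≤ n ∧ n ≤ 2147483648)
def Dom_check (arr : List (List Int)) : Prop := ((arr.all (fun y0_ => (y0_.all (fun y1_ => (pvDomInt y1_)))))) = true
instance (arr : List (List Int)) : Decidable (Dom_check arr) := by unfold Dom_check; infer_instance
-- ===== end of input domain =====

-- B (alternative): instead of A's nested pairwise scan, a single sweep that keeps all endpoints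
-- seen so far in a sorted list and binary-searches each later segment's range for a stored endpoint.

-- ===== PORT A =====
-- A: for i in range(len-1), for j in range(i+1, len): conflict if arr[i][0] or arr[i][1]
-- lies in [arr[j][0], arr[j][1]].  The index loops are transcribed as the structural
-- recursion over suffixes: head a is arr[i], the rest are the arr[j] with j > i.
-- `checkInnerA a rest = true` means the inner j-loop hit a `return False`.
def checkInnerA (a : List Int) : List (List Int) → Bool
  | [] => false
  | b :: rest =>
    if a.getD 0 0 ≥ b.getD 0 0 ∧ a.getD 0 0 ≤ b.getD 1 0 then true
    else if a.getD 1 0 ≥ b.getD 0 0 ∧ a.getD 1 0 ≤ b.getD 1 0 then true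
    else checkInnerA a rest

def checkOuterA : List (List Int) → Bool
  | [] => true
  | a :: rest => if checkInnerA a rest then false else checkOuterA rest

def check (arr : List (List Int)) : Bool := checkOuterA arr

-- ===== PORT B =====
-- Source B's hand-written _bisect_left/_bisect_right are the standard-library bisect
-- algorithms, ported as the PySem primitives PySem.List.bisectLeft / bisectRight;
-- pts.insert(idx, x) is PySem.List.insert at the (non-negative) index.
def checkGoB (pts : List Int) : List (List Int) → Bool
  | [] => true
  | seg :: rest =>
    let l := seg.getD 0 0
    let r := seg.getD 1 0
    if PySem.List.bisectLeft pts l < PySem.List.bisectRight pts r then false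
    else
      let pts1 := PySem.List.insert pts ((PySem.List.bisectLeft pts l : Nat) : Int) l
      let pts2 := PySem.List.insert pts1 ((PySem.List.bisectLeft pts1 r : Nat) : Int) r
      checkGoB pts2 rest

def check_alt (arr : List (List Int)) : Bool := checkGoB [] arr

-- ===== PRECONDITION & SPEC =====
-- Pre_ excludes inputs containing an inner list of fewer than 2 elements: Python A raises
-- IndexError when its loops reach such a list, and only returns on them accidentally (the
-- loops never index it, or an earlier pair already returned False); B raises there too
-- unless an earlier segment already answered.
def Pre_check (arr : List (List Int)) : Prop := ∀ s ∈ arr, 2 ≤ s.length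
instance (arr : List (List Int)) : Decidable (Pre_check arr) := by unfold Pre_check; infer_instance
def pvWitness_check : List (List Int) := [[1, 2], [4, 5]]

def Spec_check (arr : List (List Int)) (out : Bool) : Prop := out = check_alt arr
instance (arr : List (List Int)) (out : Bool) : Decidable (Spec_check arr out) := by unfold Spec_check; infer_instance

-- ===== CLAIM (what is proved, stated in full; the proofs are below) =====
def Claim_equal_check : Prop := ∀ (arr : List (List Int)), Dom_check arr → Pre_check arr → Spec_check arr (check arr)

-- ===== LEMMAS AND PROOFS =====

-- `p` is an endpoint conflicting with some later segment of `l`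
def hitsAny (p : Int) (l : List (List Int)) : Bool :=
  l.any (fun b => decide (b.getD 0 0 ≤ p) && decide (p ≤ b.getD 1 0))

-- A's result, phrased as an existence scan
def ea : List (List Int) → Bool
  | [] => false
  | a :: rest => checkInnerA a rest || ea rest

-- B's result, phrased on the abstract endpoint pool (order of the pool irrelevant)
def epool (pts : List Int) : List (List Int) → Bool
  | [] => false
  | seg :: rest =>
    pts.any (fun p => decide (seg.getD 0 0 ≤ p) && decide (p ≤ seg.getD 1 0)) ||
      epool (seg.getD 1 0 :: seg.getD 0 0 :: pts) rest

lemma outerA_eq (l : List (List Int)) : checkOuterA l = !(ea l) := by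
  induction l with
  | nil => rfl
  | cons a rest ih =>
    simp only [checkOuterA, ea]
    cases h : checkInnerA a rest <;> simp [ih]

lemma innerA_eq (a : List Int) (l : List (List Int)) :
    checkInnerA a l = (hitsAny (a.getD 0 0) l || hitsAny (a.getD 1 0) l) := by
  induction l with
  | nil => rfl
  | cons b rest ih =>
    simp only [checkInnerA, hitsAny, List.any_cons] at *
    by_cases h1 : a.getD 0 0 ≥ b.getD 0 0 ∧ a.getD 0 0 ≤ b.getD 1 0
    · have e1 : (decide (b.getD 0 0 ≤ a.getD 0 0) && decide (a.getD 0 0 ≤ b.getD 1 0)) = true := by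
        simp only [Bool.and_eq_true, decide_eq_true_eq]; exact ⟨h1.1, h1.2⟩
      simp only [if_pos h1, e1, Bool.true_or]
    · have e1 : (decide (b.getD 0 0 ≤ a.getD 0 0) && decide (a.getD 0 0 ≤ b.getD 1 0)) = false := by
        apply Bool.eq_false_iff.mpr
        simp only [ne_eq, Bool.and_eq_true, decide_eq_true_eq, not_and]
        exact fun hx hy => h1 ⟨hx, hy⟩
      by_cases h2 : a.getD 1 0 ≥ b.getD 0 0 ∧ a.getD 1 0 ≤ b.getD 1 0
      · have e2 : (decide (b.getD 0 0 ≤ a.getD 1 0) && decide (a.getD 1 0 ≤ b.getD 1 0)) = true := by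
          simp only [Bool.and_eq_true, decide_eq_true_eq]; exact ⟨h2.1, h2.2⟩
        simp only [if_neg h1, if_pos h2, e1, e2, Bool.false_or, Bool.true_or, Bool.or_true]
      · have e2 : (decide (b.getD 0 0 ≤ a.getD 1 0) && decide (a.getD 1 0 ≤ b.getD 1 0)) = false := by
          apply Bool.eq_false_iff.mpr
          simp only [ne_eq, Bool.and_eq_true, decide_eq_true_eq, not_and]
          exact fun hx hy => h2 ⟨hx, hy⟩
        simp only [if_neg h1, if_neg h2, e1, e2, Bool.false_or]
        exact ih

lemma any_or_split (l : List Int) (f g : Int → Bool) :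
    l.any (fun x => f x || g x) = (l.any f || l.any g) := by
  induction l with
  | nil => rfl
  | cons a rest ih =>
    simp [List.any_cons, ih, Bool.or_left_comm, Bool.or_assoc]

lemma epool_bridge (l : List (List Int)) : ∀ pts : List Int,
    epool pts l = (pts.any (fun p => hitsAny p l) || ea l) := by
  induction l with
  | nil => intro pts; simp [epool, ea, hitsAny]
  | cons seg rest ih =>
    intro pts
    have hfun : (fun p => hitsAny p (seg :: rest)) =
        (fun p => (decide (seg.getD 0 0 ≤ p) && decide (p ≤ seg.getD 1 0)) || hitsAny p rest) := by
      funext p; simp only [hitsAny, List.any_cons]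
    simp only [epool, ea, ih, List.any_cons, innerA_eq, hfun, any_or_split]
    cases pts.any fun p => decide (seg.getD 0 0 ≤ p) && decide (p ≤ seg.getD 1 0) <;>
      cases hitsAny (seg.getD 0 0) rest <;> cases hitsAny (seg.getD 1 0) rest <;>
        cases pts.any fun p => hitsAny p rest <;> cases ea rest <;> rfl

lemma epool_perm {pts pts' : List Int} (h : pts.Perm pts') (l : List (List Int)) :
    epool pts l = epool pts' l := by
  induction l generalizing pts pts' with
  | nil => rfl
  | cons seg rest ih =>
    simp only [epool]
    rw [List.Perm.any_eq h, ih (h.cons _ |>.cons _)]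

-- the sweep condition: a stored endpoint lies in [l, r]
lemma cond_iff (pts : List Int) (l r : Int) (hs : pts.Pairwise (· ≤ ·)) :
    (PySem.List.bisectLeft pts l < PySem.List.bisectRight pts r) ↔
      ∃ p ∈ pts, l ≤ p ∧ p ≤ r := by
  obtain ⟨hbl_le, hbl_lt, hbl_ge⟩ := PySem.List.bisectLeft_spec pts l hs
  obtain ⟨hbr_le, hbr_lt, hbr_ge⟩ := PySem.List.bisectRight_spec pts r hs
  constructor
  · intro h
    have hj : PySem.List.bisectLeft pts l < pts.length := lt_of_lt_of_le h hbr_le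
    exact ⟨pts[PySem.List.bisectLeft pts l], List.getElem_mem hj,
      hbl_ge _ hj le_rfl, hbr_lt _ hj h⟩
  · rintro ⟨p, hp, hlp, hpr⟩
    obtain ⟨j, hj, rfl⟩ := List.mem_iff_getElem.mp hp
    have h1 : PySem.List.bisectLeft pts l ≤ j := by
      by_contra hc
      exact absurd (hbl_lt j hj (by omega)) (by omega)
    have h2 : j < PySem.List.bisectRight pts r := by
      by_contra hc
      exact absurd (hbr_ge j hj (by omega)) (by omega)
    omega

-- inserting x at its bisect_left index: a permutation of x :: pts, and still sorted
lemma insort_perm (pts : List Int) (x : Int) (hs : pts.Pairwise (· ≤ ·)) :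
    (PySem.List.insert pts ((PySem.List.bisectLeft pts x : Nat) : Int) x).Perm (x :: pts) := by
  obtain ⟨hle, _, _⟩ := PySem.List.bisectLeft_spec pts x hs
  rw [PySem.List.insert_natCast pts _ x hle]
  calc (List.take (PySem.List.bisectLeft pts x) pts ++ x :: List.drop (PySem.List.bisectLeft pts x) pts).Perm
        (x :: (List.take (PySem.List.bisectLeft pts x) pts ++ List.drop (PySem.List.bisectLeft pts x) pts)) := List.perm_middle
    _ = x :: pts := by rw [List.take_append_drop]

lemma insort_sorted (pts : List Int) (x : Int) (hs : pts.Pairwise (· ≤ ·)) :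
    (PySem.List.insert pts ((PySem.List.bisectLeft pts x : Nat) : Int) x).Pairwise (· ≤ ·) := by
  obtain ⟨hle, hlt, hge⟩ := PySem.List.bisectLeft_spec pts x hs
  rw [PySem.List.insert_natCast pts _ x hle]
  have hget : ∀ i j (hi : i < pts.length) (hj : j < pts.length), i ≤ j → pts[i] ≤ pts[j] := by
    intro i j hi hj hij
    rcases Nat.lt_or_ge i j with h | h
    · exact List.pairwise_iff_getElem.mp hs i j hi hj h
    · have : i = j := by omega
      subst this; rfl
  rw [List.pairwise_append]
  refine ⟨hs.take, ?_, ?_⟩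
  · rw [List.pairwise_cons]
    refine ⟨?_, hs.drop⟩
    intro b hb
    obtain ⟨m, hm, rfl⟩ := List.mem_iff_getElem.mp hb
    rw [List.getElem_drop]
    exact hge _ (by simp at hm; omega) (by omega)
  · intro a ha b hb
    obtain ⟨k, hk, rfl⟩ := List.mem_iff_getElem.mp ha
    have hk' : k < PySem.List.bisectLeft pts x := by simp at hk; omega
    rw [List.getElem_take]
    have hax : pts[k] < x := hlt _ (by simp at hk; omega) hk'
    rcases List.mem_cons.mp hb with rfl | hb'
    · exact le_of_lt hax
    · obtain ⟨m, hm, rfl⟩ := List.mem_iff_getElem.mp hb'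
      rw [List.getElem_drop]
      exact le_trans (le_of_lt hax) (hge _ (by simp at hm; omega) (by omega))

lemma goB_eq (l : List (List Int)) : ∀ pts : List Int, pts.Pairwise (· ≤ ·) →
    checkGoB pts l = !(epool pts l) := by
  induction l with
  | nil => intro pts _; rfl
  | cons seg rest ih =>
    intro pts hs
    simp only [checkGoB, epool]
    by_cases hc : PySem.List.bisectLeft pts (seg.getD 0 0) < PySem.List.bisectRight pts (seg.getD 1 0)
    · have hany : pts.any (fun p => decide (seg.getD 0 0 ≤ p) && decide (p ≤ seg.getD 1 0)) = true := by
        obtain ⟨p, hp, h1, h2⟩ := (cond_iff pts _ _ hs).mp hc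
        exact List.any_eq_true.mpr ⟨p, hp, by
          simp only [Bool.and_eq_true, decide_eq_true_eq]; exact ⟨h1, h2⟩⟩
      rw [if_pos hc, hany, Bool.true_or, Bool.not_true]
    · have hany : pts.any (fun p => decide (seg.getD 0 0 ≤ p) && decide (p ≤ seg.getD 1 0)) = false := by
        rw [List.any_eq_false]
        intro p hp
        simp only [Bool.and_eq_true, decide_eq_true_eq, not_and]
        intro h1 h2
        exact hc ((cond_iff pts _ _ hs).mpr ⟨p, hp, h1, h2⟩)
      have hs1 := insort_sorted pts (seg.getD 0 0) hs
      have hp1 := insort_perm pts (seg.getD 0 0) hs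
      have hs2 := insort_sorted _ (seg.getD 1 0) hs1
      have hp2 := insort_perm _ (seg.getD 1 0) hs1
      rw [if_neg hc, hany, Bool.false_or, ih _ hs2, epool_perm (hp2.trans (hp1.cons _))]

-- ===== VERDICT (by name: the statement is the Claim_ definition above) =====
theorem check_spec : Claim_equal_check := by
  intro arr _ _
  unfold Spec_check check check_alt
  rw [outerA_eq, goB_eq _ [] List.Pairwise.nil, epool_bridge]
  simp only [List.any_nil, Bool.false_or]
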